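-- pv_equiv track=rewrite | github.com/ikarius6/jacky | core/screen_interaction/handler.py | _strip_leading_separator
-- ===== SOURCE A (Python) =====
-- def _strip_leading_separator(text: str, separators: list) -> str:
--     """Remove a single leading separator word from *text*."""
--     lower = text.lower()
--     for sep in separators:  # already sorted longest-first
--         sep_lower = sep.lower()
--         if lower.startswith(sep_lower):
--             after = text[len(sep_lower):]
--             if not after or after[0] == ' ':
--                 return after.strip()
--     return text
-- ===== SOURCE B (Python) =====
-- def _strip_leading_separator(text: str, separators: list) -> str:
--     """Remove a single leading separator word from *text*."""
--     lower = text.lower()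
--     maxlen = 0
--     for sep in separators:
--         n = len(sep.lower())
--         if n > maxlen:
--             maxlen = n
--     # one pass over the text: index every boundary prefix (prefix ending at a
--     # space or at the end of the text) no longer than the longest separator
--     cut = {}
--     for i in range(len(lower) + 1):
--         if i > maxlen:
--             break
--         if i == len(lower) or lower[i] == ' ':
--             cut[lower[:i]] = i
--     for sep in separators:
--         n = cut.get(sep.lower())
--         if n is not None:
--             return text[n:].strip()
--     return text
-- ===== Notes on version B (the rewrite author's own statement) =====
-- stated objective: faster
-- what changed: A runs a startswith prefix scan over the text for every separator; B instead makes one pass over the text to index its boundary prefixes (prefixes ending at a space or at the end, capped at the longest separator length) in a dictionary, then answers each separator by a single hash lookup.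
import Mathlib
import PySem

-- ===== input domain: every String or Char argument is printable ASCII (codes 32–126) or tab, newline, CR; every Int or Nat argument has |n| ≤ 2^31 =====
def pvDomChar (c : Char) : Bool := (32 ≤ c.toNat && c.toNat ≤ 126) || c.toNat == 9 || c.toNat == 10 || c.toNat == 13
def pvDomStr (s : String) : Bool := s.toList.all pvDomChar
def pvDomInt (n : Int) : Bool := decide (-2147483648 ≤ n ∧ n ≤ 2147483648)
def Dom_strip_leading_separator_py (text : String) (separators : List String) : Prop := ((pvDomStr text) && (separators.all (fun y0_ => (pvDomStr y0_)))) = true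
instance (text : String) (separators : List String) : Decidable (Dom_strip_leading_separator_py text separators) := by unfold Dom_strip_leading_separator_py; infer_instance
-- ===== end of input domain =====

-- B replaces A's per-separator prefix scan by one dictionary of the text's boundary
-- prefixes built in a single pass, then a hash lookup per separator (objective: faster, measured).

-- ===== PORT A =====
-- the 'for sep in separators' loop of A (early return on a match)
def pvA_loop (text lower : String) : List String → String
  | [] => text
  | sep :: rest =>
    let sep_lower := PySem.Str.lower sep
    if PySem.Str.startswith lower sep_lower = true then
      let after := PySem.Str.slice text (some (PySem.Str.len sep_lower)) none
      if after = "" ∨ PySem.Str.pyGet? after 0 = some ' ' then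
        PySem.Str.strip after
      else pvA_loop text lower rest
    else pvA_loop text lower rest

def strip_leading_separator_py (text : String) (separators : List String) : String :=
  pvA_loop text (PySem.Str.lower text) separators

-- ===== PORT B =====
-- body of B's maxlen loop
def pvB_step (m : Int) (sep : String) : Int :=
  let n := PySem.Str.len (PySem.Str.lower sep)
  if n > m then n else m

def pvB_maxlen (separators : List String) : Int :=
  separators.foldl pvB_step 0

-- B's 'for i in range(len(lower) + 1)' loop with its break; fuel = number of
-- remaining iterations (len(lower) + 1 at the start)
def pvB_build (lower : String) (maxlen : Int) : Nat → Nat → PySem.Dict String Int → PySem.Dict String Int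
  | _, 0, cut => cut
  | i, fuel+1, cut =>
    if (i : Int) > maxlen then cut
    else
      let cut' := if (i : Int) = PySem.Str.len lower ∨ PySem.Str.pyGet? lower (i : Int) = some ' '
        then cut.insert (PySem.Str.slice lower none (some (i : Int))) (i : Int)
        else cut
      pvB_build lower maxlen (i+1) fuel cut'

-- B's final 'for sep in separators' lookup loop
def pvB_find (text : String) (cut : PySem.Dict String Int) : List String → String
  | [] => text
  | sep :: rest =>
    match cut.get? (PySem.Str.lower sep) with
    | some n => PySem.Str.strip (PySem.Str.slice text (some n) none)
    | none => pvB_find text cut rest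

def strip_leading_separator_py_alt (text : String) (separators : List String) : String :=
  let lower := PySem.Str.lower text
  let maxlen := pvB_maxlen separators
  let cut := pvB_build lower maxlen 0 (lower.toList.length + 1) PySem.Dict.empty
  pvB_find text cut separators

-- ===== PRECONDITION & SPEC =====
def Spec_strip_leading_separator_py (text : String) (separators : List String) (out : String) : Prop := out = strip_leading_separator_py_alt text separators
instance (text : String) (separators : List String) (out : String) : Decidable (Spec_strip_leading_separator_py text separators out) := by unfold Spec_strip_leading_separator_py; infer_instance

-- ===== CLAIM (what is proved, stated in full; the proofs are below) =====
def Claim_equal_strip_leading_separator_py : Prop := ∀ (text : String) (separators : List String), Dom_strip_leading_separator_py text separators → Spec_strip_leading_separator_py text separators (strip_leading_separator_py text separators)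

-- ===== LEMMAS AND PROOFS =====

-- str.lower sends no character to ' ' except ' ' itself
theorem pv_toNat_ofNat (n : Nat) (h : n.isValidChar) : (Char.ofNat n).toNat = n := by
  simp [Char.ofNat, h, Char.ofNatAux, Char.toNat]

theorem pv_lowerChar_space (c : Char) : PySem.Chars.lowerChar c = ' ' ↔ c = ' ' := by
  unfold PySem.Chars.lowerChar PySem.Chars.isupper
  split_ifs with h
  · simp only [Bool.and_eq_true, decide_eq_true_eq, Char.le_def] at h
    have h1 : 65 ≤ c.toNat := h.1
    have h2 : c.toNat ≤ 90 := h.2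
    constructor
    · intro he
      have := congrArg Char.toNat he
      rw [pv_toNat_ofNat _ (Or.inl (by omega))] at this
      have hsp : (' ' : Char).toNat = 32 := by decide
      omega
    · intro he
      subst he
      simp [Char.toNat] at h1
  · exact Iff.rfl

-- characterization of the dictionary B builds: it maps exactly the boundary
-- prefixes of `lower` of length ≤ maxlen to their length
theorem pv_build_get (lower : String) (maxlen : Int) (fuel : Nat) :
    ∀ (i : Nat) (cut : PySem.Dict String Int) (s : String),
      i + fuel = lower.toList.length + 1 →
      (∀ t : String, i ≤ t.toList.length → cut.get? t = none) →
      (pvB_build lower maxlen i fuel cut).get? s =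
        if i ≤ s.toList.length ∧ (s.toList.length : Int) ≤ maxlen ∧
           s.toList = lower.toList.take s.toList.length ∧
           (s.toList.length = lower.toList.length ∨ lower.toList[s.toList.length]? = some ' ')
        then some (s.toList.length : Int) else cut.get? s := by
  induction fuel with
  | zero =>
    intro i cut s htot hinv
    have hC : ¬(i ≤ s.toList.length ∧ (s.toList.length : Int) ≤ maxlen ∧
        s.toList = lower.toList.take s.toList.length ∧
        (s.toList.length = lower.toList.length ∨ lower.toList[s.toList.length]? = some ' ')) := by
      rintro ⟨h1, _, h3, _⟩
      have hle := congrArg List.length h3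
      simp only [List.length_take] at hle
      omega
    rw [if_neg hC]
    rfl
  | succ fuel ih =>
    intro i cut s htot hinv
    by_cases hbr : (i : Int) > maxlen
    · have hC : ¬(i ≤ s.toList.length ∧ (s.toList.length : Int) ≤ maxlen ∧
          s.toList = lower.toList.take s.toList.length ∧
          (s.toList.length = lower.toList.length ∨ lower.toList[s.toList.length]? = some ' ')) := by
        rintro ⟨h1, h2, _, _⟩
        have : (i : Int) ≤ (s.toList.length : Int) := by exact_mod_cast h1
        omega
      rw [if_neg hC]
      simp only [pvB_build, if_pos hbr]
    · have hile : i ≤ lower.toList.length := by omega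
      have hkeyl : (PySem.Str.slice lower none (some (i : Int))).toList = lower.toList.take i := by
        rw [PySem.Str.toList_slice]
        exact PySem.List.slice_to_natCast lower.toList i
      have hkeylen : (PySem.Str.slice lower none (some (i : Int))).toList.length = i := by
        rw [hkeyl]
        simp only [List.length_take]
        omega
      have hcondi : ((i : Int) = PySem.Str.len lower ∨ PySem.Str.pyGet? lower (i : Int) = some ' ') ↔
          (i = lower.toList.length ∨ lower.toList[i]? = some ' ') := by
        rw [PySem.Str.len_eq, PySem.Str.pyGet?_natCast]
        simp [Nat.cast_inj]
      simp only [pvB_build, if_neg hbr]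
      by_cases hc : ((i : Int) = PySem.Str.len lower ∨ PySem.Str.pyGet? lower (i : Int) = some ' ')
      · rw [if_pos hc]
        have hinv' : ∀ t : String, i + 1 ≤ t.toList.length →
            (cut.insert (PySem.Str.slice lower none (some (i : Int))) (i : Int)).get? t = none := by
          intro t ht
          rw [PySem.Dict.get?_insert_of_ne cut ((i : Nat) : Int) (by
            intro he
            have := congrArg (fun u => u.toList.length) he
            simp only at this
            rw [hkeylen] at this
            omega)]
          exact hinv t (by omega)
        rw [ih (i + 1) _ s (by omega) hinv']
        rcases Nat.lt_trichotomy s.toList.length i with hni | hni | hni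
        · have hne : s ≠ PySem.Str.slice lower none (some (i : Int)) := by
            intro he
            have := congrArg (fun u => u.toList.length) he
            simp only at this
            rw [hkeylen] at this
            omega
          rw [if_neg (by rintro ⟨h1, _⟩; omega), if_neg (by rintro ⟨h1, _⟩; omega),
            PySem.Dict.get?_insert_of_ne cut ((i : Nat) : Int) hne]
        · by_cases hs : s = PySem.Str.slice lower none (some (i : Int))
          · subst hs
            rw [if_neg (by rintro ⟨h1, _⟩; rw [hkeylen] at h1; omega)]
            rw [PySem.Dict.get?_insert_self]
            rw [if_pos ⟨le_of_eq hkeylen.symm, by rw [hkeylen]; omega,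
              by rw [hkeylen, hkeyl], by rw [hkeylen]; exact hcondi.mp hc⟩]
            rw [hkeylen]
          · rw [if_neg (by rintro ⟨h1, _⟩; omega),
              PySem.Dict.get?_insert_of_ne cut ((i : Nat) : Int) hs,
              if_neg (by
                rintro ⟨h1, h2, h3, h4⟩
                apply hs
                rw [← String.toList_inj, hkeyl, ← hni]
                exact h3)]
        · have hne : s ≠ PySem.Str.slice lower none (some (i : Int)) := by
            intro he
            have := congrArg (fun u => u.toList.length) he
            simp only at this
            rw [hkeylen] at this
            omega
          by_cases hC : ((s.toList.length : Int) ≤ maxlen ∧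
              s.toList = lower.toList.take s.toList.length ∧
              (s.toList.length = lower.toList.length ∨ lower.toList[s.toList.length]? = some ' '))
          · rw [if_pos ⟨by omega, hC.1, hC.2.1, hC.2.2⟩, if_pos ⟨by omega, hC.1, hC.2.1, hC.2.2⟩]
          · rw [if_neg (by rintro ⟨h1, h2, h3, h4⟩; exact hC ⟨h2, h3, h4⟩),
              if_neg (by rintro ⟨h1, h2, h3, h4⟩; exact hC ⟨h2, h3, h4⟩),
              PySem.Dict.get?_insert_of_ne cut ((i : Nat) : Int) hne]
      · rw [if_neg hc]
        rw [ih (i + 1) cut s (by omega) (fun t ht => hinv t (by omega))]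
        rcases Nat.lt_trichotomy s.toList.length i with hni | hni | hni
        · rw [if_neg (by rintro ⟨h1, _⟩; omega), if_neg (by rintro ⟨h1, _⟩; omega)]
        · rw [if_neg (by rintro ⟨h1, _⟩; omega),
            if_neg (by
              rintro ⟨h1, h2, h3, h4⟩
              rw [hni] at h4
              exact hc (hcondi.mpr h4))]
        · by_cases hC : ((s.toList.length : Int) ≤ maxlen ∧
              s.toList = lower.toList.take s.toList.length ∧
              (s.toList.length = lower.toList.length ∨ lower.toList[s.toList.length]? = some ' '))
          · rw [if_pos ⟨by omega, hC.1, hC.2.1, hC.2.2⟩, if_pos ⟨by omega, hC.1, hC.2.1, hC.2.2⟩]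
          · rw [if_neg (by rintro ⟨h1, h2, h3, h4⟩; exact hC ⟨h2, h3, h4⟩),
              if_neg (by rintro ⟨h1, h2, h3, h4⟩; exact hC ⟨h2, h3, h4⟩)]

theorem pv_foldl_step_le (seps : List String) : ∀ m : Int, m ≤ seps.foldl pvB_step m := by
  induction seps with
  | nil => intro m; simp
  | cons sep rest ih =>
    intro m
    refine le_trans ?_ (ih (pvB_step m sep))
    unfold pvB_step
    dsimp only
    split <;> omega

theorem pv_mem_le_maxlen (sep : String) (seps : List String) (h : sep ∈ seps) :
    ∀ m : Int, PySem.Str.len (PySem.Str.lower sep) ≤ seps.foldl pvB_step m := by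
  induction seps with
  | nil => cases h
  | cons hd rest ih =>
    intro m
    rcases List.mem_cons.mp h with he | hm
    · subst he
      refine le_trans ?_ (pv_foldl_step_le rest (pvB_step m sep))
      unfold pvB_step
      dsimp only
      split <;> omega
    · exact ih hm (pvB_step m hd)

-- the two separator loops agree, given the dictionary characterization
theorem pv_find_eq (text : String) (maxlen : Int) (cut : PySem.Dict String Int)
    (hcut : ∀ s : String, cut.get? s =
      if (s.toList.length : Int) ≤ maxlen ∧
         s.toList = (PySem.Str.lower text).toList.take s.toList.length ∧
         (s.toList.length = (PySem.Str.lower text).toList.length ∨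
          (PySem.Str.lower text).toList[s.toList.length]? = some ' ')
      then some (s.toList.length : Int) else none) :
    ∀ seps : List String, (∀ sep ∈ seps, PySem.Str.len (PySem.Str.lower sep) ≤ maxlen) →
      pvA_loop text (PySem.Str.lower text) seps = pvB_find text cut seps := by
  intro seps
  induction seps with
  | nil => intro _; rfl
  | cons sep rest ih =>
    intro hle
    have hrest := fun s hs => hle s (List.mem_cons_of_mem _ hs)
    have hsep := hle sep (List.mem_cons_self ..)
    have hLT : (PySem.Str.lower text).toList = text.toList.map PySem.Chars.lowerChar := by
      rw [PySem.Str.toList_lower]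
      rfl
    have hlen : (PySem.Str.lower text).toList.length = text.toList.length := by
      rw [hLT, List.length_map]
    have hlenint : PySem.Str.len (PySem.Str.lower sep) = ((PySem.Str.lower sep).toList.length : Int) :=
      PySem.Str.len_eq _
    have hafter : (PySem.Str.slice text (some (PySem.Str.len (PySem.Str.lower sep))) none).toList =
        text.toList.drop (PySem.Str.lower sep).toList.length := by
      rw [hlenint, PySem.Str.toList_slice]
      exact PySem.List.slice_from_natCast text.toList _
    simp only [pvA_loop, pvB_find]
    by_cases hpre : (PySem.Str.lower sep).toList =
        (PySem.Str.lower text).toList.take (PySem.Str.lower sep).toList.length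
    · have hnle : (PySem.Str.lower sep).toList.length ≤ (PySem.Str.lower text).toList.length := by
        have := congrArg List.length hpre
        simp only [List.length_take] at this
        omega
      have hstart : PySem.Str.startswith (PySem.Str.lower text) (PySem.Str.lower sep) = true := by
        rw [PySem.Str.startswith_eq, PySem.Chars.startswith_iff, List.prefix_iff_eq_take]
        exact hpre
      rw [if_pos hstart]
      have hempty : (PySem.Str.slice text (some (PySem.Str.len (PySem.Str.lower sep))) none = "") ↔
          text.toList.length ≤ (PySem.Str.lower sep).toList.length := by
        rw [← String.toList_inj, hafter]
        simp [List.drop_eq_nil_iff]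
      have hget : (PySem.Str.pyGet? (PySem.Str.slice text (some (PySem.Str.len (PySem.Str.lower sep))) none) 0 =
          some ' ') ↔ text.toList[(PySem.Str.lower sep).toList.length]? = some ' ' := by
        rw [show (0 : Int) = ((0 : Nat) : Int) from rfl, PySem.Str.pyGet?_natCast, hafter,
          List.getElem?_drop]
        norm_num
      have hchar : text.toList[(PySem.Str.lower sep).toList.length]? = some ' ' ↔
          (PySem.Str.lower text).toList[(PySem.Str.lower sep).toList.length]? = some ' ' := by
        rw [hLT, List.getElem?_map]
        cases text.toList[(PySem.Str.lower sep).toList.length]? with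
        | none => simp
        | some c => simp [pv_lowerChar_space c]
      by_cases hcond : (PySem.Str.slice text (some (PySem.Str.len (PySem.Str.lower sep))) none = "" ∨
          PySem.Str.pyGet? (PySem.Str.slice text (some (PySem.Str.len (PySem.Str.lower sep))) none) 0 = some ' ')
      · rw [if_pos hcond]
        have hsome : cut.get? (PySem.Str.lower sep) = some ((PySem.Str.lower sep).toList.length : Int) := by
          rw [hcut]
          rw [if_pos ⟨by rw [← hlenint]; exact hsep, hpre, by
            rcases hcond with hc | hc
            · left
              have := hempty.mp hc
              omega
            · right
              exact hchar.mp (hget.mp hc)⟩]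
        rw [hsome, ← hlenint]
      · rw [if_neg hcond]
        have hnone : cut.get? (PySem.Str.lower sep) = none := by
          rw [hcut]
          rw [if_neg (by
            rintro ⟨h1, h2, h3⟩
            apply hcond
            rcases h3 with h3 | h3
            · exact Or.inl (hempty.mpr (by omega))
            · exact Or.inr (hget.mpr (hchar.mpr h3)))]
        rw [hnone]
        exact ih hrest
    · have hstart : ¬(PySem.Str.startswith (PySem.Str.lower text) (PySem.Str.lower sep) = true) := by
        rw [PySem.Str.startswith_eq, PySem.Chars.startswith_iff, List.prefix_iff_eq_take]
        exact hpre
      rw [if_neg hstart]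
      have hnone : cut.get? (PySem.Str.lower sep) = none := by
        rw [hcut]
        rw [if_neg (by rintro ⟨_, h2, _⟩; exact hpre h2)]
      rw [hnone]
      exact ih hrest

-- ===== VERDICT (by name: the statement is the Claim_ definition above) =====
theorem strip_leading_separator_py_spec : Claim_equal_strip_leading_separator_py := by
  intro text separators _
  unfold Spec_strip_leading_separator_py strip_leading_separator_py strip_leading_separator_py_alt
  dsimp only
  refine pv_find_eq text (pvB_maxlen separators) _ ?_ separators ?_
  · intro s
    rw [pv_build_get (PySem.Str.lower text) (pvB_maxlen separators)
      ((PySem.Str.lower text).toList.length + 1) 0 PySem.Dict.empty s (by omega)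
      (fun t _ => by simp [PySem.Dict.get?, PySem.Dict.empty])]
    simp only [Nat.zero_le, true_and]
    split <;> [rfl; simp [PySem.Dict.get?, PySem.Dict.empty]]
  · intro sep hm
    exact pv_mem_le_maxlen sep separators hm 0
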